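-- pv_equiv track=rewrite | github.com/jonathonreilly/toy-physics | scripts/frontier_staggered_force_gauge_multi_cycle_homology_theorem.py | bfs_spanning_tree
-- ===== SOURCE A (Python) =====
-- from collections import deque
-- from typing import Dict, List, Set, Tuple
--
-- Edge = Tuple[int, int]
--
-- Adj = Dict[int, List[int]]
--
-- def bfs_spanning_tree(adj: Adj, root: int) -> Tuple[Dict[int, int], Set[Edge]]:
--     """Return (parent map, tree edges) from BFS rooted at `root`."""
--     parent: Dict[int, int] = {root: -1}
--     tree_edges: Set[Edge] = set()
--     q = deque([root])
--     while q:
--         v = q.popleft()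
--         for u in adj.get(v, ()):
--             if u not in parent:
--                 parent[u] = v
--                 tree_edges.add((min(u, v), max(u, v)))
--                 q.append(u)
--     return parent, tree_edges
-- ===== SOURCE B (Python) =====
-- from typing import Dict, List, Set, Tuple
--
-- Edge = Tuple[int, int]
-- Adj = Dict[int, List[int]]
--
--
-- def bfs_spanning_tree(adj: Adj, root: int) -> Tuple[Dict[int, int], Set[Edge]]:
--     """Return (parent map, tree edges) from BFS rooted at `root`.
--
--     The traversal itself only tracks a `seen` set and emits the flat list of
--     discovery pairs (child, parent) by recursing level by level; the parent
--     map and the edge set are assembled afterwards in separate passes.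
--     """
--     def expand(frontier: List[int], seen: Set[int]) -> List[Tuple[int, int]]:
--         pairs: List[Tuple[int, int]] = []
--         for v in frontier:
--             for u in adj.get(v, ()):
--                 if u not in seen:
--                     seen.add(u)
--                     pairs.append((u, v))
--         if not pairs:
--             return []
--         return pairs + expand([u for u, _ in pairs], seen)
--
--     pairs = expand([root], {root})
--     parent: Dict[int, int] = {root: -1}
--     parent.update(pairs)
--     tree_edges: Set[Edge] = {(min(u, v), max(u, v)) for u, v in pairs}
--     return parent, tree_edges
-- ===== Notes on version B (the rewrite author's own statement) =====
-- stated objective: alternative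
-- what changed: Replaces A's single queue loop that mutates the parent dict and edge set in place with a recursive traversal that only tracks a seen set and emits a flat list of (child, parent) discovery pairs level by level; the parent map and the edge set are then assembled from that list in separate post-passes.
import Mathlib
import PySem

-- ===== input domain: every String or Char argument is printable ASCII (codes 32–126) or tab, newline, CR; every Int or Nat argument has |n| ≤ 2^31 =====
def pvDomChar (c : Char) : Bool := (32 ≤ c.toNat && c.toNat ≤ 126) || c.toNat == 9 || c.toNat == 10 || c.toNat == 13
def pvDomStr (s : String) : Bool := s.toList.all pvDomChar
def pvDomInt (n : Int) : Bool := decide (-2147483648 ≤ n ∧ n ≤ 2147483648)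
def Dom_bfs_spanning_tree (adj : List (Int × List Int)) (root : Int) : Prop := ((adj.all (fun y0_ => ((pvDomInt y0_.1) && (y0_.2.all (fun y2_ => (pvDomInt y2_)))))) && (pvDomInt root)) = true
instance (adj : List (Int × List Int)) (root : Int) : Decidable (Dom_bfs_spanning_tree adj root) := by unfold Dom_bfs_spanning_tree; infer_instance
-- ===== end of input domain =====

-- B replaces A's in-place queue BFS (mutating parent/tree_edges as it pops) by a recursive
-- traversal that only tracks a seen set and emits the flat discovery-pair list, from which
-- parent and tree_edges are assembled in separate post-passes; same results, same cost.

-- ===== PORT A =====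
-- A's `while q:` loop; the Nat argument is a totality fuel only (pops are bounded by
-- 1 + the total number of adjacency-list entries, so with that fuel it never runs out).
def bfsQLoop (adj : List (Int × List Int)) :
    Nat → PySem.Dict Int Int → PySem.Set (Int × Int) → List Int →
    PySem.Dict Int Int × PySem.Set (Int × Int)
  | 0, parent, te, _ => (parent, te)
  | _ + 1, parent, te, [] => (parent, te)
  | n + 1, parent, te, v :: q =>
      -- for u in adj.get(v, ()): if u not in parent: parent[u]=v; add edge; q.append(u)
      let s := (PySem.Dict.getD (PySem.Dict.mk adj) v []).foldl
        (fun (s : PySem.Dict Int Int × PySem.Set (Int × Int) × List Int) u =>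
          if s.1.contains u then s
          else (s.1.insert u v, PySem.Set.add s.2.1 (min u v, max u v), s.2.2 ++ [u]))
        (parent, te, q)
      bfsQLoop adj n s.1 s.2.1 s.2.2

def bfs_spanning_tree (adj : List (Int × List Int)) (root : Int) :
    (List (Int × Int)) × (List (Int × Int)) :=
  let r := bfsQLoop adj (1 + ((adj.map (·.2)).flatten).length)
    (PySem.Dict.mk [(root, -1)]) [] [root]
  (r.1.items, r.2)

-- ===== PORT B =====
-- the double `for v in frontier: for u in adj.get(v, ()): …` pass of B's `expand`,
-- collecting the discovery pairs of one level and growing the seen set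
def bLevel (adj : List (Int × List Int)) (frontier : List Int) (seen : PySem.Set Int) :
    List (Int × Int) × PySem.Set Int :=
  frontier.foldl
    (fun s v =>
      (PySem.Dict.getD (PySem.Dict.mk adj) v []).foldl
        (fun (s : List (Int × Int) × PySem.Set Int) u =>
          if PySem.Set.contains s.2 u then s
          else (s.1 ++ [(u, v)], PySem.Set.add s.2 u))
        s)
    ([], seen)

-- B's recursive `expand`; the Nat argument is a totality fuel only (each recursion step
-- discovers ≥ 1 new vertex, so the fuel guard branch is never reached from the entry fuel).
def bExpand (adj : List (Int × List Int)) (fuel : Nat) (frontier : List Int)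
    (seen : PySem.Set Int) : List (Int × Int) :=
  let s := bLevel adj frontier seen
  if hp : s.1 = [] then []
  else if h : fuel < s.1.length then []
  else s.1 ++ bExpand adj (fuel - s.1.length) (s.1.map (·.1)) s.2
  termination_by fuel
  decreasing_by
    have hs : s = bLevel adj frontier seen := rfl
    rw [hs] at hp h
    have h1 : (bLevel adj frontier seen).1.length ≠ 0 :=
      fun hz => hp (List.eq_nil_of_length_eq_zero hz)
    omega

def bfs_spanning_tree_alt (adj : List (Int × List Int)) (root : Int) :
    (List (Int × Int)) × (List (Int × Int)) :=
  let pairs := bExpand adj (1 + ((adj.map (·.2)).flatten).length) [root]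
    (PySem.Set.ofList [root])
  let parent := pairs.foldl (fun (d : PySem.Dict Int Int) p => d.insert p.1 p.2)
    (PySem.Dict.mk [(root, -1)])
  let te := pairs.foldl
    (fun (s : PySem.Set (Int × Int)) p => PySem.Set.add s (min p.1 p.2, max p.1 p.2))
    ([] : PySem.Set (Int × Int))
  (parent.items, te)

-- ===== PRECONDITION & SPEC =====
def Spec_bfs_spanning_tree (adj : List (Int × List Int)) (root : Int) (out : (List (Int × Int)) × (List (Int × Int))) : Prop := out = bfs_spanning_tree_alt adj root
instance (adj : List (Int × List Int)) (root : Int) (out : (List (Int × Int)) × (List (Int × Int))) : Decidable (Spec_bfs_spanning_tree adj root out) := by unfold Spec_bfs_spanning_tree; infer_instance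

-- ===== CLAIM (what is proved, stated in full; the proofs are below) =====
def Claim_equal_bfs_spanning_tree : Prop := ∀ (adj : List (Int × List Int)) (root : Int), Dom_bfs_spanning_tree adj root → Spec_bfs_spanning_tree adj root (bfs_spanning_tree adj root)

-- ===== LEMMAS AND PROOFS =====

abbrev AState := PySem.Dict Int Int × PySem.Set (Int × Int) × List Int
abbrev LState := List (Int × Int) × PySem.Set Int

def stepFn (v : Int) : AState → Int → AState := fun s u =>
  if s.1.contains u then s
  else (s.1.insert u v, PySem.Set.add s.2.1 (min u v, max u v), s.2.2 ++ [u])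

def bStepFn (v : Int) : LState → Int → LState := fun s u =>
  if PySem.Set.contains s.2 u then s
  else (s.1 ++ [(u, v)], PySem.Set.add s.2 u)

def nbrs (adj : List (Int × List Int)) (v : Int) : List Int :=
  PySem.Dict.getD (PySem.Dict.mk adj) v []

def levelBody (adj : List (Int × List Int)) : AState → Int → AState :=
  fun s v => (nbrs adj v).foldl (stepFn v) s

def bLevelBody (adj : List (Int × List Int)) : LState → Int → LState :=
  fun s v => (nbrs adj v).foldl (bStepFn v) s

def insFn : PySem.Dict Int Int → Int × Int → PySem.Dict Int Int :=
  fun d p => d.insert p.1 p.2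

def edgeFn : PySem.Set (Int × Int) → Int × Int → PySem.Set (Int × Int) :=
  fun s p => PySem.Set.add s (min p.1 p.2, max p.1 p.2)

def uAll (adj : List (Int × List Int)) : List Int := (adj.map (·.2)).flatten

def keyCnt (adj : List (Int × List Int)) (ks : List Int) : Nat :=
  (uAll adj).countP (fun u => decide (u ∉ ks))

-- a fold body that only appends to the third (list) component of the state
def ShiftOK (h : AState → Int → AState) : Prop :=
  ∀ p t q a, h (p, t, q) a = ((h (p, t, []) a).1, (h (p, t, []) a).2.1, q ++ (h (p, t, []) a).2.2)

-- a fold body that only appends to the first (pairs) component of the state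
def BShiftOK (h : LState → Int → LState) : Prop :=
  ∀ pr sn a, h (pr, sn) a = (pr ++ (h ([], sn) a).1, (h ([], sn) a).2)

lemma shiftOK_step (v : Int) : ShiftOK (stepFn v) := by
  intro p t q a
  by_cases hc : p.contains a <;> simp [stepFn, hc]

lemma bShiftOK_step (v : Int) : BShiftOK (bStepFn v) := by
  intro pr sn a
  by_cases hc : a ∈ sn <;> simp [bStepFn, hc]

lemma foldl_shiftOK {h : AState → Int → AState} (H : ShiftOK h) :
    ∀ (l : List Int) (p : PySem.Dict Int Int) t q,
      l.foldl h (p, t, q) =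
        ((l.foldl h (p, t, []) ).1, (l.foldl h (p, t, []) ).2.1, q ++ (l.foldl h (p, t, []) ).2.2) := by
  intro l
  induction l with
  | nil => intro p t q; simp
  | cons a l ih =>
      intro p t q
      rcases hX : h (p, t, []) a with ⟨X1, X2, X3⟩
      simp only [List.foldl_cons, H p t q a, hX]
      rw [ih X1 X2 (q ++ X3), ih X1 X2 X3]
      simp

lemma foldl_bShiftOK {h : LState → Int → LState} (H : BShiftOK h) :
    ∀ (l : List Int) (pr : List (Int × Int)) sn,
      l.foldl h (pr, sn) = (pr ++ (l.foldl h ([], sn)).1, (l.foldl h ([], sn)).2) := by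
  intro l
  induction l with
  | nil => intro pr sn; simp
  | cons a l ih =>
      intro pr sn
      rcases hX : h ([], sn) a with ⟨X1, X2⟩
      simp only [List.foldl_cons, H pr sn a, hX]
      rw [ih (pr ++ X1) X2, ih X1 X2]
      simp

lemma shiftOK_level (adj : List (Int × List Int)) : ShiftOK (levelBody adj) := by
  intro p t q a
  exact foldl_shiftOK (shiftOK_step a) (nbrs adj a) p t q

lemma bShiftOK_level (adj : List (Int × List Int)) : BShiftOK (bLevelBody adj) := by
  intro pr sn a
  exact foldl_bShiftOK (bShiftOK_step a) (nbrs adj a) pr sn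

lemma nbrs_subset (adj : List (Int × List Int)) (v : Int) :
    ∀ u ∈ nbrs adj v, u ∈ uAll adj := by
  induction adj with
  | nil => intro u hu; simp [nbrs, PySem.Dict.getD, PySem.Dict.get?] at hu
  | cons kv rest ih =>
      intro u hu
      obtain ⟨k, l⟩ := kv
      by_cases hk : ((k : Int) == v) = true
      · simp [nbrs, PySem.Dict.getD, PySem.Dict.get?_mk_cons, hk] at hu
        simp [uAll]
        exact Or.inl hu
      · simp only [nbrs, PySem.Dict.getD, PySem.Dict.get?_mk_cons, hk] at hu
        have := ih u hu
        simp [uAll] at this ⊢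
        exact Or.inr this

-- one neighbour scan: B's pairs are A's new frontier tagged with the parent v, B's seen
-- set is A's key list, and A's dict / edge set are the pair-folds over B's pairs
lemma innerCorr (v : Int) :
    ∀ (ns : List Int) (p : PySem.Dict Int Int) t,
      (ns.foldl (bStepFn v) ([], p.keys)).1 =
        (ns.foldl (stepFn v) (p, t, [])).2.2.map (fun u => (u, v)) ∧
      (ns.foldl (bStepFn v) ([], p.keys)).2 = (ns.foldl (stepFn v) (p, t, [])).1.keys ∧
      (ns.foldl (stepFn v) (p, t, [])).1 =
        (ns.foldl (bStepFn v) ([], p.keys)).1.foldl insFn p ∧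
      (ns.foldl (stepFn v) (p, t, [])).2.1 =
        (ns.foldl (bStepFn v) ([], p.keys)).1.foldl edgeFn t := by
  intro ns
  induction ns with
  | nil => intro p t; simp
  | cons u ns ih =>
      intro p t
      by_cases hc : p.contains u
      · have hA : stepFn v (p, t, []) u = (p, t, []) := by simp [stepFn, hc]
        have hm : u ∈ p.keys := (PySem.Dict.contains_iff_mem_keys p u).mp hc
        have hB : bStepFn v ([], p.keys) u = ([], p.keys) := by
          simp [bStepFn, hm]
        simp only [List.foldl_cons, hA, hB]
        exact ih p t
      · have hcf : p.contains u = false := by simpa using hc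
        have hnm : u ∉ p.keys := fun hm =>
          hc ((PySem.Dict.contains_iff_mem_keys p u).mpr hm)
        have hA : stepFn v (p, t, []) u =
            (p.insert u v, PySem.Set.add t (min u v, max u v), [u]) := by
          simp [stepFn, hcf]
        have hB : bStepFn v ([], p.keys) u = ([(u, v)], (p.insert u v).keys) := by
          simp only [bStepFn]
          rw [if_neg (by simpa using hnm)]
          rw [PySem.Set.add_of_not_mem hnm, PySem.Dict.keys_insert_of_not_contains p v hcf]
          simp
        simp only [List.foldl_cons, hA, hB]
        rw [foldl_shiftOK (shiftOK_step v) ns (p.insert u v)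
          (PySem.Set.add t (min u v, max u v)) [u]]
        rw [foldl_bShiftOK (bShiftOK_step v) ns [(u, v)] (p.insert u v).keys]
        obtain ⟨h1, h2, h3, h4⟩ := ih (p.insert u v) (PySem.Set.add t (min u v, max u v))
        refine ⟨?_, ?_, ?_, ?_⟩
        · simp [h1]
        · simpa using h2
        · rw [h3]
          simp [insFn]
        · rw [h4]
          simp [edgeFn]

-- the same correspondence for one whole level (A's block of pops / B's one `expand` pass)
lemma levelCorr (adj : List (Int × List Int)) :
    ∀ (f : List Int) (p : PySem.Dict Int Int) t,
      (f.foldl (bLevelBody adj) ([], p.keys)).1.map (·.1) =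
        (f.foldl (levelBody adj) (p, t, [])).2.2 ∧
      (f.foldl (bLevelBody adj) ([], p.keys)).2 =
        (f.foldl (levelBody adj) (p, t, [])).1.keys ∧
      (f.foldl (levelBody adj) (p, t, [])).1 =
        (f.foldl (bLevelBody adj) ([], p.keys)).1.foldl insFn p ∧
      (f.foldl (levelBody adj) (p, t, [])).2.1 =
        (f.foldl (bLevelBody adj) ([], p.keys)).1.foldl edgeFn t := by
  intro f
  induction f with
  | nil => intro p t; simp
  | cons v f ih =>
      intro p t
      rcases hA : (nbrs adj v).foldl (stepFn v) (p, t, []) with ⟨I1, I2, I3⟩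
      rcases hB : (nbrs adj v).foldl (bStepFn v) ([], p.keys) with ⟨J1, J2⟩
      obtain ⟨i1, i2, i3, i4⟩ := innerCorr v (nbrs adj v) p t
      rw [hA, hB] at i1 i2 i3 i4
      dsimp only at i1 i2 i3 i4
      have hAbody : levelBody adj (p, t, []) v = (I1, I2, I3) := by
        simp [levelBody, hA]
      have hBbody : bLevelBody adj ([], p.keys) v = (J1, J2) := by
        simp [bLevelBody, hB]
      simp only [List.foldl_cons, hAbody, hBbody]
      rw [foldl_shiftOK (shiftOK_level adj) f I1 I2 I3]
      rw [i2] at hB ⊢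
      rw [foldl_bShiftOK (bShiftOK_level adj) f J1 I1.keys]
      obtain ⟨h1, h2, h3, h4⟩ := ih I1 I2
      refine ⟨?_, ?_, ?_, ?_⟩
      · simp only [List.map_append, h1, i1, List.map_map]
        simp [Function.comp_def]
      · exact h2
      · rw [h3, i3, List.foldl_append]
      · rw [h4, i4, List.foldl_append]

-- facts about one vertex's neighbour scan (started with an empty append-accumulator)
lemma innerFacts (v : Int) :
    ∀ (ns : List Int) (p : PySem.Dict Int Int) t,
      (ns.foldl (stepFn v) (p, t, [])).1.keys = p.keys ++ (ns.foldl (stepFn v) (p, t, [])).2.2 ∧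
      (p.keys.Nodup → (ns.foldl (stepFn v) (p, t, [])).1.keys.Nodup) ∧
      (∀ u ∈ (ns.foldl (stepFn v) (p, t, [])).2.2, u ∈ ns) := by
  intro ns
  induction ns with
  | nil => intro p t; simp
  | cons u ns ih =>
      intro p t
      by_cases hc : p.contains u
      · have hstep : stepFn v (p, t, []) u = (p, t, []) := by simp [stepFn, hc]
        simp only [List.foldl_cons, hstep]
        obtain ⟨h1, h2, h3⟩ := ih p t
        exact ⟨h1, h2, fun x hx => List.mem_cons_of_mem _ (h3 x hx)⟩
      · have hcf : p.contains u = false := by simpa using hc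
        have hstep : stepFn v (p, t, []) u =
            (p.insert u v, PySem.Set.add t (min u v, max u v), [u]) := by
          simp [stepFn, hcf]
        simp only [List.foldl_cons, hstep]
        rw [foldl_shiftOK (shiftOK_step v) ns (p.insert u v) (PySem.Set.add t (min u v, max u v)) [u]]
        obtain ⟨h1, h2, h3⟩ := ih (p.insert u v) (PySem.Set.add t (min u v, max u v))
        refine ⟨?_, ?_, ?_⟩
        · simp only [h1, PySem.Dict.keys_insert_of_not_contains p v hcf]
          simp
        · intro hnd
          exact h2 (PySem.Dict.nodup_keys_insert p u v hnd)
        · intro x hx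
          simp only [List.mem_append, List.mem_singleton] at hx
          rcases hx with hx | hx
          · simp [hx]
          · exact List.mem_cons_of_mem _ (h3 x hx)

-- structural facts about one level of A (key growth, Nodup, frontier ⊆ all entries)
lemma levelFacts (adj : List (Int × List Int)) :
    ∀ (f : List Int) (p : PySem.Dict Int Int) t,
      (f.foldl (levelBody adj) (p, t, [])).1.keys = p.keys ++ (f.foldl (levelBody adj) (p, t, [])).2.2 ∧
      (p.keys.Nodup → (f.foldl (levelBody adj) (p, t, [])).1.keys.Nodup) ∧
      (∀ u ∈ (f.foldl (levelBody adj) (p, t, [])).2.2, u ∈ uAll adj) := by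
  intro f
  induction f with
  | nil => intro p t; simp
  | cons v f ih =>
      intro p t
      rcases hI : (nbrs adj v).foldl (stepFn v) (p, t, []) with ⟨I1, I2, I3⟩
      obtain ⟨i1, i2, i3⟩ := innerFacts v (nbrs adj v) p t
      rw [hI] at i1 i2 i3
      have hbody : levelBody adj (p, t, []) v = (I1, I2, I3) := by
        simp [levelBody, hI]
      simp only [List.foldl_cons, hbody]
      rw [foldl_shiftOK (shiftOK_level adj) f I1 I2 I3]
      obtain ⟨h1, h2, h3⟩ := ih I1 I2
      refine ⟨?_, ?_, ?_⟩
      · simp only [h1, i1]; simp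
      · intro hnd; exact h2 (i2 hnd)
      · intro x hx
        simp only [List.mem_append] at hx
        rcases hx with hx | hx
        · exact nbrs_subset adj v x (i3 x hx)
        · exact h3 x hx

lemma countP_drop (U ks : List Int) (u : Int) (hu : u ∈ U) (hks : u ∉ ks) :
    U.countP (fun x => decide (x ∉ ks ++ [u])) + 1 ≤ U.countP (fun x => decide (x ∉ ks)) := by
  induction U with
  | nil => simp at hu
  | cons x U ih =>
      rw [List.countP_cons, List.countP_cons]
      by_cases hxu : x = u
      · subst hxu
        have hmono : U.countP (fun y => decide (y ∉ ks ++ [x])) ≤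
            U.countP (fun y => decide (y ∉ ks)) := by
          apply List.countP_mono_left
          intro y _ hy
          simp at hy ⊢
          exact hy.1
        simp [hks] at hmono ⊢
        omega
      · have hu' : u ∈ U := by
          rcases List.mem_cons.mp hu with h | h
          · exact absurd h.symm hxu
          · exact h
        have hUb := ih hu'
        simp at hUb
        by_cases hxk : x ∈ ks <;> simp [hxk, hxu] <;> omega

lemma keyCnt_level (adj : List (Int × List Int)) :
    ∀ (nf ks : List Int), (ks ++ nf).Nodup → (∀ u ∈ nf, u ∈ uAll adj) →
      keyCnt adj (ks ++ nf) + nf.length ≤ keyCnt adj ks := by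
  intro nf
  induction nf with
  | nil => intro ks _ _; simp
  | cons u nf ih =>
      intro ks hnd hsub
      have hks : u ∉ ks := by
        have := List.disjoint_of_nodup_append hnd
        intro hmem
        exact this hmem (List.mem_cons_self ..)
      have h1 : keyCnt adj (ks ++ [u]) + 1 ≤ keyCnt adj ks :=
        countP_drop (uAll adj) ks u (hsub u (List.mem_cons_self ..)) hks
      have hnd' : ((ks ++ [u]) ++ nf).Nodup := by
        simpa [List.append_assoc] using hnd
      have h2 := ih (ks ++ [u]) hnd' (fun x hx => hsub x (List.mem_cons_of_mem _ hx))
      rw [List.append_assoc] at h2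
      simp only [List.singleton_append] at h2
      simp only [List.length_cons]
      omega

-- A's queue loop, one step at a time, written with stepFn (definitional)
lemma qloop_cons (adj : List (Int × List Int)) (n : Nat) (p : PySem.Dict Int Int) t v q :
    bfsQLoop adj (n + 1) p t (v :: q) =
      bfsQLoop adj n ((nbrs adj v).foldl (stepFn v) (p, t, q)).1
        ((nbrs adj v).foldl (stepFn v) (p, t, q)).2.1
        ((nbrs adj v).foldl (stepFn v) (p, t, q)).2.2 := rfl

-- processing a block f at the front of A's queue is exactly one level fold
lemma qloop_level (adj : List (Int × List Int)) :
    ∀ (f r : List Int) (p : PySem.Dict Int Int) t (n : Nat),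
      bfsQLoop adj (f.length + n) p t (f ++ r) =
        bfsQLoop adj n (f.foldl (levelBody adj) (p, t, [])).1
          (f.foldl (levelBody adj) (p, t, [])).2.1
          (r ++ (f.foldl (levelBody adj) (p, t, [])).2.2) := by
  intro f
  induction f with
  | nil => intro r p t n; simp
  | cons v f ih =>
      intro r p t n
      rcases hI : (nbrs adj v).foldl (stepFn v) (p, t, []) with ⟨I1, I2, I3⟩
      have hbody : levelBody adj (p, t, []) v = (I1, I2, I3) := by simp [levelBody, hI]
      have hq : (nbrs adj v).foldl (stepFn v) (p, t, f ++ r) = (I1, I2, (f ++ r) ++ I3) := by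
        rw [foldl_shiftOK (shiftOK_step v) (nbrs adj v) p t (f ++ r), hI]
      have hlen : (v :: f).length + n = (f.length + n) + 1 := by simp; omega
      rw [hlen]
      rw [show (v :: f) ++ r = v :: (f ++ r) from rfl]
      rw [qloop_cons adj (f.length + n) p t v (f ++ r), hq]
      have hfr : (f ++ r) ++ I3 = f ++ (r ++ I3) := by simp
      rw [hfr]
      rw [ih (r ++ I3) I1 I2 n]
      simp only [List.foldl_cons, hbody]
      rw [foldl_shiftOK (shiftOK_level adj) f I1 I2 I3]
      simp

-- main loop correspondence: with enough fuel on both sides, A's queue loop computes the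
-- two pair-folds over B's discovery list
lemma main_loop (adj : List (Int × List Int)) :
    ∀ (n : Nat) (m : Nat) (p : PySem.Dict Int Int) t (f : List Int),
      p.keys.Nodup → f.length + keyCnt adj p.keys ≤ n → keyCnt adj p.keys ≤ m →
      bfsQLoop adj n p t f =
        ((bExpand adj m f p.keys).foldl insFn p,
         (bExpand adj m f p.keys).foldl edgeFn t) := by
  intro n
  induction n using Nat.strong_induction_on with
  | _ n ih =>
      intro m p t f hnd hle hm
      match f with
      | [] =>
          have hB : bExpand adj m [] p.keys = [] := by
            rw [bExpand]
            simp [bLevel]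
          rw [hB]
          cases n <;> simp [bfsQLoop]
      | v :: rest =>
          have hlen : (v :: rest).length ≤ n := by
            have := hle; simp at this ⊢; omega
          rcases hL : (v :: rest).foldl (levelBody adj) (p, t, []) with ⟨L1, L2, L3⟩
          rcases hBL : (v :: rest).foldl (bLevelBody adj) ([], p.keys) with ⟨P, S⟩
          obtain ⟨l1, l2, l3⟩ := levelFacts adj (v :: rest) p t
          rw [hL] at l1 l2 l3
          dsimp only at l1 l2 l3
          obtain ⟨c1, c2, c3, c4⟩ := levelCorr adj (v :: rest) p t
          rw [hL, hBL] at c1 c2 c3 c4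
          dsimp only at c1 c2 c3 c4
          have hBlevel : bLevel adj (v :: rest) p.keys = (P, S) := hBL
          -- left side: split the queue run into a level plus the rest
          have hsplit := qloop_level adj (v :: rest) [] p t (n - (v :: rest).length)
          rw [Nat.add_sub_cancel' hlen, List.append_nil, hL] at hsplit
          simp only [List.nil_append] at hsplit
          have hPlen : P.length = L3.length := by
            rw [← c1]; simp
          have hcnt : keyCnt adj (p.keys ++ L3) + L3.length ≤ keyCnt adj p.keys :=
            keyCnt_level adj L3 p.keys (l1 ▸ l2 hnd) l3
          by_cases hL3 : L3 = []
          · -- nothing new discovered: B's pairs are empty, both sides stop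
            have hP : P = [] := by
              have h0 : P.length = 0 := by rw [hPlen, hL3]; rfl
              exact List.eq_nil_of_length_eq_zero h0
            have hB : bExpand adj m (v :: rest) p.keys = [] := by
              rw [bExpand]
              simp [hBlevel, hP]
            rw [hB, hsplit, hL3]
            have hL1 : L1 = p := by rw [c3, hP]; simp
            have hL2 : L2 = t := by rw [c4, hP]; simp
            rw [hL1, hL2]
            cases hnn : n - (v :: rest).length <;> simp [bfsQLoop]
          · -- a non-empty level: peel it off on both sides and recurse
            have hPne : P ≠ [] := by
              intro h
              rw [h] at hPlen
              exact hL3 (List.eq_nil_of_length_eq_zero hPlen.symm)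
            have hmge : ¬ m < P.length := by
              rw [hPlen]; omega
            have hB : bExpand adj m (v :: rest) p.keys =
                P ++ bExpand adj (m - P.length) (P.map (·.1)) S := by
              rw [bExpand]
              simp [hBlevel, hPne, hmge]
            have hnd' : L1.keys.Nodup := l2 hnd
            have hkeys' : keyCnt adj L1.keys = keyCnt adj (p.keys ++ L3) := by rw [l1]
            have hpos : 0 < (v :: rest).length := by simp
            have hrec := ih (n - (v :: rest).length) (by omega) (m - P.length) L1 L2 L3
              hnd' (by rw [hkeys']; omega) (by rw [hkeys', hPlen]; omega)
            rw [hsplit, hB, c2, List.foldl_append, List.foldl_append, ← c3, ← c4, c1]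
            exact hrec

-- ===== VERDICT (by name: the statement is the Claim_ definition above) =====
theorem bfs_spanning_tree_spec : Claim_equal_bfs_spanning_tree := by
  intro adj root _
  unfold Spec_bfs_spanning_tree bfs_spanning_tree bfs_spanning_tree_alt
  have hkeys : (PySem.Dict.mk [(root, -1)] : PySem.Dict Int Int).keys = [root] := rfl
  have hset : (PySem.Set.ofList [root] : PySem.Set Int) =
      (PySem.Dict.mk [(root, -1)] : PySem.Dict Int Int).keys := rfl
  have hnd : (PySem.Dict.mk [(root, -1)] : PySem.Dict Int Int).keys.Nodup := by
    simp [PySem.Dict.keys]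
  have hcnt : keyCnt adj (PySem.Dict.mk [(root, -1)] : PySem.Dict Int Int).keys ≤
      ((adj.map (·.2)).flatten).length := by
    rw [hkeys]; exact List.countP_le_length
  have h := main_loop adj (1 + ((adj.map (·.2)).flatten).length)
    (1 + ((adj.map (·.2)).flatten).length)
    (PySem.Dict.mk [(root, -1)]) [] [root] hnd
    (by simp only [List.length_cons, List.length_nil]; omega) (by omega)
  rw [hset, h]
  rfl
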